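-- pv_equiv track=rewrite | github.com/takedary/codility | l17_2_NumberSolitaire.py | solution_recur
-- ===== SOURCE A (Python) =====
-- def solution_recur(A):
--   dp = {0: A[0]}
--   def recur(i):
--     try:
--       return dp[i]
--     except KeyError:
--       pass
--
--     dp[i] = max(recur(j) for j in range(i-6, i) if j >= 0) + A[i]
--     return dp[i]
--
--   return recur(len(A)-1)
-- ===== SOURCE B (Python) =====
-- def solution_recur(A):
--   dp = [A[0]]
--   for i in range(1, len(A)):
--     dp.append(max(dp[max(0, i - 6):i]) + A[i])
--   return dp[-1]
-- ===== Notes on version B (the rewrite author's own statement) =====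
-- stated objective: simpler
-- what changed: Replaces top-down memoized recursion with a nested helper and exception-driven dict cache by a plain bottom-up forward sweep filling a dp list and returning its last entry.
import Mathlib
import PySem

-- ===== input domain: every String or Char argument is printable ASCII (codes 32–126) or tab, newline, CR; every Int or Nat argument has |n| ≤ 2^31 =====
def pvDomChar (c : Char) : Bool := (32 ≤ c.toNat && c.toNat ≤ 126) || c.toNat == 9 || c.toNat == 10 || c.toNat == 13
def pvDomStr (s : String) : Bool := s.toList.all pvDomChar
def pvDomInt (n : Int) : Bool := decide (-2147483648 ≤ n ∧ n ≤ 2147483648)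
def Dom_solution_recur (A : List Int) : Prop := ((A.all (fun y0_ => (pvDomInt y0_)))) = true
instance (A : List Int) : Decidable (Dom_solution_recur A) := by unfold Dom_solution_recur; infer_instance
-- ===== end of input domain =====

-- B replaces A's top-down memoized recursion by a bottom-up dp-list sweep (same O(n) cost, plainer code).
-- Both programs raise IndexError on the empty list (A[0]); Pre_ excludes exactly that input.

-- ===== PORT A =====
-- recur(i): the dict dp only memoizes; each dp[i] is computed top-down from recur(j), j in range(i-6, i), j ≥ 0.
def recurA (A : List Int) : Nat → Int
  | 0 => (PySem.List.pyGet? A 0).getD 0          -- dp = {0: A[0]}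
  | (m+1) =>
    let js := (PySem.List.pyRange ((m:Int)+1-6) ((m:Int)+1)).filter (fun j => decide (0 ≤ j))
    (PySem.List.max? (js.attach.map (fun j => recurA A j.1.toNat)) (fun x => x)).getD 0
      + (PySem.List.pyGet? A ((m:Int)+1)).getD 0
decreasing_by
  have h := j.2
  simp only [js, List.mem_filter, PySem.List.mem_pyRange_one, decide_eq_true_eq] at h
  omega

def solution_recur (A : List Int) : Int := recurA A (A.length - 1)

-- ===== PORT B =====
def solution_recur_alt (A : List Int) : Int :=
  let dp0 : List Int := [(PySem.List.pyGet? A 0).getD 0]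
  let dp := (PySem.List.pyRange 1 (A.length : Int)).foldl
      (fun dp i =>
        dp ++ [(PySem.List.max? (PySem.List.slice dp (some (max 0 (i-6))) (some i)) (fun x => x)).getD 0
               + (PySem.List.pyGet? A i).getD 0]) dp0
  (PySem.List.pyGet? dp (-1)).getD 0

-- ===== PRECONDITION & SPEC =====
-- Pre_ excludes only the empty list, on which the Python A raises IndexError at A[0].
def Pre_solution_recur (A : List Int) : Prop := A ≠ []
instance (A : List Int) : Decidable (Pre_solution_recur A) := by unfold Pre_solution_recur; infer_instance
def pvWitness_solution_recur : List Int := ([1, -2, 0, 9, -1, -2])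

def Spec_solution_recur (A : List Int) (out : Int) : Prop := out = solution_recur_alt A
instance (A : List Int) (out : Int) : Decidable (Spec_solution_recur A out) := by unfold Spec_solution_recur; infer_instance

-- ===== CLAIM (what is proved, stated in full; the proofs are below) =====
def Claim_equal_solution_recur : Prop := ∀ (A : List Int), Dom_solution_recur A → Pre_solution_recur A → Spec_solution_recur A (solution_recur A)

-- ===== LEMMAS AND PROOFS =====

theorem pyRange_nil (a b : Int) (h : b ≤ a) : PySem.List.pyRange a b = [] := by
  simp [PySem.List.pyRange]; omega

-- mapping recur over pyRange between natural bounds is mapping it over range'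
theorem pyRange_map_toNat (A : List Int) (a n : Nat) :
    (PySem.List.pyRange (a : Int) ((a + n : Nat) : Int)).map (fun j => recurA A j.toNat)
      = (List.range' a n).map (recurA A) := by
  induction n generalizing a with
  | zero =>
    rw [show ((a + 0 : Nat) : Int) = (a : Int) by push_cast; ring, pyRange_nil _ _ le_rfl]
    simp
  | succ n ih =>
    rw [PySem.List.pyRange_one_cons (by push_cast; omega), List.map_cons,
        show ((a : Int) + 1) = ((a + 1 : Nat) : Int) by push_cast; ring,
        show ((a + (n + 1) : Nat) : Int) = (((a + 1) + n : Nat) : Int) by push_cast; ring,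
        ih (a + 1), List.range'_succ, List.map_cons]
    simp

-- the window both programs take the max over is the same list of already-computed values
theorem window_eq (A : List Int) (m : Nat) :
    ((PySem.List.pyRange ((m:Int) - 6) (m:Int)).filter (fun j => decide (0 ≤ j))).map
        (fun j => recurA A j.toNat)
      = PySem.List.slice ((List.range m).map (recurA A)) (some (max 0 ((m:Int) - 6))) (some (m:Int)) := by
  set a : Nat := m - min m 6 with ha
  have hcast : max 0 ((m:Int) - 6) = ((a : Nat) : Int) := by simp [ha]; omega
  have hsplit : PySem.List.pyRange ((m:Int) - 6) (m:Int)
      = PySem.List.pyRange ((m:Int) - 6) ((a:Nat):Int) ++ PySem.List.pyRange ((a:Nat):Int) (m:Int) :=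
    PySem.List.pyRange_one_append _ _ _ (by omega) (by omega)
  have hlow : (PySem.List.pyRange ((m:Int) - 6) ((a:Nat):Int)).filter (fun j => decide (0 ≤ j)) = [] := by
    by_cases hm : m ≤ 6
    · refine List.filter_eq_nil_iff.mpr ?_
      intro j hj
      rw [PySem.List.mem_pyRange_one] at hj
      simp only [decide_eq_true_eq]
      omega
    · rw [pyRange_nil _ _ (by omega)]; rfl
  have hhigh : (PySem.List.pyRange ((a:Nat):Int) (m:Int)).filter (fun j => decide (0 ≤ j))
      = PySem.List.pyRange ((a:Nat):Int) (m:Int) := by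
    refine List.filter_eq_self.mpr ?_
    intro j hj
    rw [PySem.List.mem_pyRange_one] at hj
    simp only [decide_eq_true_eq]
    omega
  have hm' : ((m : Nat) : Int) = ((a + (m - a) : Nat) : Int) := by omega
  have h1 : List.take (a + (m - a) - a) (List.drop a (List.map (recurA A) (List.range m)))
      = (List.range' a (m - a)).map (recurA A) := by
    have hdrop : (List.range m).drop a = List.range' a (m - a) := by
      simp [List.range_eq_range', List.drop_range']
    rw [← List.map_drop, hdrop, ← List.map_take, List.take_of_length_le (by simp)]
  rw [hsplit, List.filter_append, hlow, hhigh, List.nil_append, hcast, hm',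
      PySem.List.slice_natCast, pyRange_map_toNat A a (m - a), h1]

-- B's dp list after the sweep up to index n is exactly [recurA 0, …, recurA n]
theorem dp_loop (A : List Int) (n : Nat) :
    (PySem.List.pyRange 1 ((n + 1 : Nat) : Int)).foldl
        (fun dp i =>
          dp ++ [(PySem.List.max? (PySem.List.slice dp (some (max 0 (i-6))) (some i)) (fun x => x)).getD 0
                 + (PySem.List.pyGet? A i).getD 0])
        [(PySem.List.pyGet? A 0).getD 0]
      = (List.range (n + 1)).map (recurA A) := by
  induction n with
  | zero =>
    rw [pyRange_nil 1 _ (by norm_num)]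
    simp [recurA]
  | succ n ih =>
    have h2 : PySem.List.pyRange ((n + 1 : Nat) : Int) ((n + 2 : Nat) : Int) = [((n + 1 : Nat) : Int)] := by
      rw [PySem.List.pyRange_one_cons (by push_cast; omega), pyRange_nil _ _ (by push_cast; omega)]
    have hsplit : PySem.List.pyRange 1 ((n + 2 : Nat) : Int)
        = PySem.List.pyRange 1 ((n + 1 : Nat) : Int) ++ [((n + 1 : Nat) : Int)] := by
      rw [PySem.List.pyRange_one_append 1 ((n + 1 : Nat) : Int) ((n + 2 : Nat) : Int) (by push_cast; omega) (by push_cast; omega), h2]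
    rw [hsplit, List.foldl_append, ih]
    rw [List.foldl_cons, List.foldl_nil]
    have hrec : recurA A (n + 1)
        = (PySem.List.max? ((((PySem.List.pyRange ((n:Int)+1-6) ((n:Int)+1)).filter
              (fun j => decide (0 ≤ j)))).map (fun j => recurA A j.toNat)) (fun x => x)).getD 0
          + (PySem.List.pyGet? A ((n:Int)+1)).getD 0 := by
      rw [recurA]
      simp
    rw [show (List.range (n + 1 + 1)).map (recurA A)
          = (List.range (n + 1)).map (recurA A) ++ [recurA A (n + 1)] by
        rw [List.range_succ, List.map_append]; rfl]
    have hw := window_eq A (n + 1)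
    push_cast at hw hrec ⊢
    rw [hrec, ← hw]

-- ===== VERDICT (by name: the statement is the Claim_ definition above) =====
theorem solution_recur_spec : Claim_equal_solution_recur := by
  intro A _hDom hPre
  unfold Spec_solution_recur solution_recur
  obtain ⟨n, hn⟩ : ∃ n, A.length = n + 1 := by
    cases A with
    | nil => exact absurd rfl hPre
    | cons x xs => exact ⟨xs.length, rfl⟩
  have halt : solution_recur_alt A
      = (PySem.List.pyGet? ((PySem.List.pyRange 1 (A.length : Int)).foldl
          (fun dp i =>
            dp ++ [(PySem.List.max? (PySem.List.slice dp (some (max 0 (i-6))) (some i)) (fun x => x)).getD 0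
                   + (PySem.List.pyGet? A i).getD 0])
          [(PySem.List.pyGet? A 0).getD 0]) (-1)).getD 0 := rfl
  rw [halt, hn, dp_loop A n]
  rw [show (List.range (n + 1)).map (recurA A)
        = (List.range n).map (recurA A) ++ [recurA A n] by
      rw [List.range_succ, List.map_append]; rfl]
  have hlen : ((List.range n).map (recurA A)).length = n := by simp
  simp [PySem.List.pyGet?, PySem.List.pyIdx?, hlen]
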